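-- pv_equiv track=rewrite | github.com/DeepakTSingh1998/Mini-Projects | Codility-Practice/Leader/EquiLeader.py | solution
-- ===== SOURCE A (Python) =====
-- def solution (A):
--
--     Temp = []
--     Equi = 0
--     for i in range(0,len(A)-1):
--         Temp.append(A[0])
--         del A[0]
--
--         Unique_Temp = {}
--         Unique_A = {}
--
--         for i in Temp:
--             if str(i) in Unique_Temp:
--                 Unique_Temp[str(i)]['Counter'] += 1
--             else:
--                 Unique_Temp[str(i)]= {'Counter':1}
--
--         for i in A:
--             if str(i) in Unique_A:
--                 Unique_A[str(i)]['Counter'] += 1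
--             else:
--                 Unique_A[str(i)]= {'Counter':1}
--
--         Temp_biggest = 0
--
--         for i in Unique_Temp:
--             if float(Unique_Temp[i]['Counter']) > Temp_biggest:
--                 Temp_biggest = float(Unique_Temp[i]['Counter'])
--                 Temp_most = int(i)
--             elif float(Unique_Temp[i]['Counter']) == Temp_biggest:
--                 Temp_biggest = float(Unique_Temp[i]['Counter'])
--                 Temp_most = False
--
--         A_biggest = 0
--
--         for i in Unique_A:
--             if float(Unique_A[i]['Counter']) > A_biggest:
--                 A_biggest = float(Unique_A[i]['Counter'])
--                 A_most = int(i)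
--             elif float(Unique_A[i]['Counter']) == A_biggest:
--                 A_biggest = float(Unique_A[i]['Counter'])
--                 A_most = False
--
--         if Temp_most == A_most:
--             Equi += 1
--
--     return Equi
-- ===== SOURCE B (Python) =====
-- def solution(A):
--     # One O(n) pass from each end, maintaining the "unique mode or tie" of every
--     # prefix/suffix incrementally (A recomputes it from scratch for every split).
--     # Tie is encoded as 0, matching Python's False == 0 in the comparison.
--     # Unlike A, this does not mutate the input list (return value is the same).
--     n = len(A)
--     if n < 2:
--         return 0
--     def modes(seq):
--         counts = {}
--         m = 0
--         ties = 0
--         modal = 0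
--         out = []
--         for x in seq:
--             c = counts.get(x, 0) + 1
--             counts[x] = c
--             if c > m:
--                 m = c
--                 ties = 1
--                 modal = x
--             elif c == m:
--                 ties += 1
--             out.append(modal if ties == 1 else 0)
--         return out
--     pref = modes(A)
--     suf = modes(list(reversed(A)))
--     return sum(1 for i in range(n - 1) if pref[i] == suf[n - 2 - i])
-- ===== Notes on version B (the rewrite author's own statement) =====
-- stated objective: faster
-- what changed: A rebuilds the frequency dicts of both halves from scratch for every split position and re-scans them for the mode; B makes one incremental pass from each end, maintaining each prefix's/suffix's unique-mode-or-tie (tie encoded as 0, matching Python's False == 0) in O(1) per element, then compares the two precomputed arrays; B also does not mutate the input list, whereas A empties it down to one element.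
import Mathlib
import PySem

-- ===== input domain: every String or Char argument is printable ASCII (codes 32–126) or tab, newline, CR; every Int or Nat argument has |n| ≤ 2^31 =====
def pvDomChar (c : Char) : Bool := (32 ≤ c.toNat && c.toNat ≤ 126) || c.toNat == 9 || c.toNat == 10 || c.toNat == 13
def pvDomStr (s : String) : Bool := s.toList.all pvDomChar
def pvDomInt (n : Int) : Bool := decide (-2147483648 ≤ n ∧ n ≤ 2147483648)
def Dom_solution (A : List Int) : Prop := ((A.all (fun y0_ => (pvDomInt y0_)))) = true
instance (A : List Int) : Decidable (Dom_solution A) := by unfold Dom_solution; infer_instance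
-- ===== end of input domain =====

-- B replaces A's per-split recount (rebuilding both frequency dicts for every split) by one
-- incremental pass from each end maintaining the unique-mode-or-tie of every prefix/suffix
-- (tie encoded as 0, which matches Python's `False == 0`); objective: faster.
-- A empties its argument list down to one element (del A[0] in a loop); B does not mutate
-- its argument — the equivalence proved here is about the RETURN value only.


-- ===== PORT A =====
-- Python builds Unique_Temp / Unique_A keyed by str(i) with values {'Counter': c}.
-- Ported as a dict keyed by the int i itself holding the counter c: str is injective on ints
-- and int(str(i)) == i, and the keys are only built, iterated and looked up, so the key set,
-- its insertion order, the counters and the int(i) read back are all exactly Python's.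
def pvBuild (l : List Int) : PySem.Dict Int Int :=
  l.foldl (fun d i =>
    if d.contains i then d.modify i 0 (· + 1)   -- Unique[str(i)]['Counter'] += 1
    else d.insert i 1) PySem.Dict.empty          -- Unique[str(i)] = {'Counter': 1}

-- the 'for i in Unique_*' scan: state (biggest, most); 'none' ports the Python False
-- (the initial 'none' ports the unassigned variable; never read, the dict is nonempty in A's loop).
-- float(...) casts of the integer counters are exact here and ported as Int.
def pvScan (d : PySem.Dict Int Int) : Int × Option Int :=
  d.keys.foldl (fun st k =>
    let c := d.getD k 0
    if c > st.1 then (c, some k)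
    else if c = st.1 then (c, none)
    else st) (0, none)

-- Python's '==' between int-or-False values: False == False is True, and False == 0 is True.
def pvEqMost (a b : Option Int) : Bool :=
  match a, b with
  | some v, some w => v == w
  | some v, none   => v == 0
  | none,   some w => (0 : Int) == w
  | none,   none   => true

-- one iteration of A's outer loop, on the state (Temp, A, Equi)
def pvStepA (st : List Int × List Int × Int) : List Int × List Int × Int :=
  match PySem.List.pyGet? st.2.1 0 with   -- Temp.append(A[0])
  | none => st                            -- IndexError: unreachable, the list is nonempty in the loop
  | some x =>
    let temp := st.1 ++ [x]
    let rest := st.2.1.drop 1             -- del A[0]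
    let tm := (pvScan (pvBuild temp)).2   -- Temp_most
    let am := (pvScan (pvBuild rest)).2   -- A_most
    (temp, rest, if pvEqMost tm am then st.2.2 + 1 else st.2.2)

def solution (A : List Int) : Int :=
  ((PySem.List.pyRange 0 ((A.length : Int) - 1) 1).foldl (fun st _ => pvStepA st)
    (([] : List Int), A, (0 : Int))).2.2

-- ===== PORT B =====
-- one iteration of Source B's modes() loop, on the state (counts, m, ties, modal, out)
def pvStepB (st : PySem.Dict Int Int × Int × Int × Int × List Int) (x : Int) :
    PySem.Dict Int Int × Int × Int × Int × List Int :=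
  let c := st.1.getD x 0 + 1
  let counts := st.1.insert x c
  let mtm : Int × Int × Int :=
    if c > st.2.1 then (c, 1, x)
    else if c = st.2.1 then (st.2.1, st.2.2.1 + 1, st.2.2.2.1)
    else (st.2.1, st.2.2.1, st.2.2.2.1)
  (counts, mtm.1, mtm.2.1, mtm.2.2, st.2.2.2.2 ++ [if mtm.2.1 = 1 then mtm.2.2 else 0])

def pvModes (seq : List Int) : List Int :=
  (seq.foldl pvStepB (PySem.Dict.empty, (0:Int), (0:Int), (0:Int), ([] : List Int))).2.2.2.2

def solution_alt (A : List Int) : Int :=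
  let n : Int := A.length
  if n < 2 then 0
  else
    let pref := pvModes A
    let suf := pvModes A.reverse
    -- sum(1 for i in range(n-1) if pref[i] == suf[n-2-i]); both indices are in range,
    -- so comparing the pyGet? options compares exactly the Python list elements
    (PySem.List.pyRange 0 (n - 1) 1).foldl (fun acc i =>
      acc + if PySem.List.pyGet? pref i == PySem.List.pyGet? suf (n - 2 - i) then 1 else 0) 0

-- ===== PRECONDITION & SPEC =====
def Spec_solution (A : List Int) (out : Int) : Prop := out = solution_alt A
instance (A : List Int) (out : Int) : Decidable (Spec_solution A out) := by unfold Spec_solution; infer_instance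

-- ===== CLAIM (what is proved, stated in full; the proofs are below) =====
def Claim_equal_solution : Prop := ∀ (A : List Int), Dom_solution A → Spec_solution A (solution A)

-- ===== LEMMAS AND PROOFS =====

-- the common specification both ports are reduced to: count of x in l, the maximal count,
-- the values attaining it (in first-occurrence order), the unique mode (none = tied),
-- its Python-comparison encoding (tie ↔ 0), and the per-split comparison
def pvCnt (l : List Int) (x : Int) : Int := (l.count x : Int)
def pvM (l : List Int) : Int := (PySem.List.dedup l).foldl (fun b x => max b (pvCnt l x)) 0
def pvAtM (l : List Int) : List Int := (PySem.List.dedup l).filter (fun x => pvCnt l x = pvM l)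
def pvMost (l : List Int) : Option Int := match pvAtM l with | [x] => some x | _ => none
def pvDec (o : Option Int) : Int := o.getD 0
def pvEqAt (A : List Int) (j : Nat) : Bool :=
  pvDec (pvMost (A.take (j+1))) == pvDec (pvMost (A.drop (j+1)))

-- ---- generic list facts ----
theorem pvFilterSingleton {l : List Int} {p : Int → Bool} {x : Int}
    (hn : l.Nodup) (hx : x ∈ l) (hp : ∀ y ∈ l, p y = true ↔ y = x) :
    l.filter p = [x] := by
  induction l with
  | nil => simp at hx
  | cons a t ih =>
    rcases List.mem_cons.mp hx with h | h
    · subst h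
      have hpa : p x = true := (hp x (by simp)).mpr rfl
      have ht : t.filter p = [] := by
        rw [List.filter_eq_nil_iff]
        intro y hy hpy
        have := (hp y (by simp [hy])).mp hpy
        subst this
        exact (List.nodup_cons.mp hn).1 hy
      simp [hpa, ht]
    · have hpa : p a = false := by
        by_contra hc
        have h2 : p a = true := by simpa using hc
        have := (hp a (by simp)).mp h2
        subst this
        exact (List.nodup_cons.mp hn).1 h
      rw [List.filter_cons_of_neg (by simp [hpa])]
      exact ih (List.nodup_cons.mp hn).2 h (fun y hy => hp y (by simp [hy]))

theorem pvCountPFlip {l : List Int} {p q : Int → Bool} {x : Int}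
    (hn : l.Nodup) (hx : x ∈ l) (hpx : p x = false) (hqx : q x = true)
    (hagree : ∀ y ∈ l, y ≠ x → p y = q y) :
    l.countP q = l.countP p + 1 := by
  induction l with
  | nil => simp at hx
  | cons a t ih =>
    rcases List.mem_cons.mp hx with h | h
    · subst h
      have ht : t.countP q = t.countP p := by
        apply List.countP_congr
        intro y hy
        rw [hagree y (by simp [hy]) (fun hyx => (List.nodup_cons.mp hn).1 (hyx ▸ hy))]
      simp [hpx, hqx, ht]
    · have hax : a ≠ x := fun hax => (List.nodup_cons.mp hn).1 (hax ▸ h)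
      have hpa := hagree a (by simp) hax
      have hrec := ih (List.nodup_cons.mp hn).2 h (fun y hy => hagree y (by simp [hy]))
      simp only [List.countP_cons, ← hpa, hrec]
      omega

theorem pvNodup_dedup (l : List Int) : (PySem.List.dedup l).Nodup := by
  rw [PySem.List.dedup_eq_ofList]; exact PySem.Set.nodup_ofList l

theorem pvDedup_append (l : List Int) (x : Int) :
    PySem.List.dedup (l ++ [x]) =
      if x ∈ l then PySem.List.dedup l else PySem.List.dedup l ++ [x] := by
  have h1 : PySem.List.dedup (l ++ [x]) = PySem.Set.add (PySem.List.dedup l) x := by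
    simp only [PySem.List.dedup_eq_ofList, PySem.Set.ofList_eq_foldl, List.foldl_append,
      List.foldl_cons, List.foldl_nil]
  rw [h1, PySem.Set.add_eq_ite]
  simp [PySem.List.dedup_eq_ofList, PySem.Set.mem_ofList]

-- ---- facts about pvCnt / pvM / pvAtM / pvMost ----
theorem pvCnt_nonneg (l : List Int) (x : Int) : 0 ≤ pvCnt l x := by
  unfold pvCnt; positivity

theorem pvCnt_append (l : List Int) (x y : Int) :
    pvCnt (l ++ [x]) y = pvCnt l y + (if y = x then 1 else 0) := by
  unfold pvCnt
  rw [List.count_append]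
  by_cases h : y = x
  · simp [h]
  · rw [List.count_singleton]
    simp [h]
    omega

theorem pvM_eq_foldl_map (l : List Int) :
    pvM l = List.foldl max 0 ((PySem.List.dedup l).map (pvCnt l)) := by
  rw [List.foldl_map]; rfl

theorem pvM_nil : pvM ([] : List Int) = 0 := rfl

theorem pvCnt_le_pvM {l : List Int} {x : Int} (hx : x ∈ l) : pvCnt l x ≤ pvM l := by
  rw [pvM_eq_foldl_map]
  exact (PySem.List.le_foldl_max _ 0).2 _
    (List.mem_map_of_mem ((PySem.List.mem_dedup _ _).mpr hx))

theorem pvM_att {l : List Int} (h : l ≠ []) : ∃ y ∈ l, pvCnt l y = pvM l := by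
  have hmem : pvM l = 0 ∨ pvM l ∈ (PySem.List.dedup l).map (pvCnt l) := by
    rw [pvM_eq_foldl_map]
    generalize (PySem.List.dedup l).map (pvCnt l) = ms
    induction ms using List.reverseRecOn with
    | nil => left; rfl
    | append_singleton t a ih =>
      rw [List.foldl_append, List.foldl_cons, List.foldl_nil]
      by_cases hle : List.foldl max 0 t ≤ a
      · right; simp [max_eq_right hle]
      · rw [max_eq_left (by omega)]
        rcases ih with h0 | hm
        · left; exact h0
        · right; exact List.mem_append_left _ hm
  rcases hmem with h0 | hm
  · exfalso
    obtain ⟨a, t, rfl⟩ := List.exists_cons_of_ne_nil h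
    have h1 : pvCnt (a :: t) a ≤ pvM (a :: t) := pvCnt_le_pvM (by simp)
    have h2 : (1 : Int) ≤ pvCnt (a :: t) a := by
      unfold pvCnt
      have : 1 ≤ (a :: t).count a := List.one_le_count_iff.mpr (by simp)
      exact_mod_cast this
    omega
  · obtain ⟨y, hy, hval⟩ := List.mem_map.mp hm
    exact ⟨y, (PySem.List.mem_dedup _ _).mp hy, hval⟩

theorem pvM_ne_nil {l : List Int} (h : 0 < pvM l) : l ≠ [] := by
  intro hc; subst hc; rw [pvM_nil] at h; omega

theorem pvM_unique {l : List Int} {M : Int}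
    (hb : ∀ y ∈ l, pvCnt l y ≤ M) (ha : ∃ y ∈ l, pvCnt l y = M) : pvM l = M := by
  obtain ⟨y, hy, hval⟩ := ha
  have h1 : pvCnt l y ≤ pvM l := pvCnt_le_pvM hy
  obtain ⟨z, hz, hzval⟩ := pvM_att (List.ne_nil_of_mem hy)
  have h2 := hb z hz
  omega

theorem pvAtM_ne {l : List Int} (h : l ≠ []) : pvAtM l ≠ [] := by
  obtain ⟨y, hy, hval⟩ := pvM_att h
  unfold pvAtM
  intro hc
  rw [List.filter_eq_nil_iff] at hc
  exact hc y ((PySem.List.mem_dedup _ _).mpr hy) (by simp [hval])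

theorem pvMost_of_singleton {l : List Int} {x : Int} (h : pvAtM l = [x]) : pvMost l = some x := by
  unfold pvMost; rw [h]

theorem pvMost_of_len_ne {l : List Int} (h : (pvAtM l).length ≠ 1) : pvMost l = none := by
  unfold pvMost
  match hm : pvAtM l with
  | [] => rfl
  | [x] => rw [hm] at h; simp at h
  | a :: b :: t => rfl

-- ---- appending one element: the three cases, with c = (count of x in l) + 1 ----
theorem pvAppend_gt {l : List Int} {x : Int} (h : pvCnt l x + 1 > pvM l) :
    pvM (l ++ [x]) = pvCnt l x + 1 ∧ pvAtM (l ++ [x]) = [x] := by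
  have hM : pvM (l ++ [x]) = pvCnt l x + 1 := by
    apply pvM_unique
    · intro y hy
      rw [pvCnt_append]
      by_cases hyx : y = x
      · subst hyx; simp
      · simp only [hyx, if_false, add_zero]
        have : y ∈ l := by
          rcases List.mem_append.mp hy with h' | h'
          · exact h'
          · simp at h'; exact absurd h' hyx
        have := pvCnt_le_pvM this
        omega
    · exact ⟨x, by simp, by rw [pvCnt_append]; simp⟩
  refine ⟨hM, ?_⟩
  unfold pvAtM
  apply pvFilterSingleton (pvNodup_dedup _)
  · exact (PySem.List.mem_dedup _ _).mpr (by simp)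
  · intro y hy
    simp only [decide_eq_true_eq]
    constructor
    · intro hval
      by_contra hyx
      have hyl : y ∈ l := by
        have := (PySem.List.mem_dedup _ _).mp hy
        rcases List.mem_append.mp this with h' | h'
        · exact h'
        · simp at h'; exact absurd h' hyx
      rw [pvCnt_append, hM] at hval
      simp only [hyx, if_false, add_zero] at hval
      have := pvCnt_le_pvM hyl
      omega
    · intro hyx; subst hyx
      rw [pvCnt_append, hM]; simp

theorem pvAppend_eq {l : List Int} {x : Int} (h : pvCnt l x + 1 = pvM l) :
    pvM (l ++ [x]) = pvM l ∧ (pvAtM (l ++ [x])).length = (pvAtM l).length + 1 := by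
  have hc0 := pvCnt_nonneg l x
  have hM : pvM (l ++ [x]) = pvM l := by
    apply pvM_unique
    · intro y hy
      rw [pvCnt_append]
      by_cases hyx : y = x
      · subst hyx; simp; omega
      · simp only [hyx, if_false, add_zero]
        rcases List.mem_append.mp hy with h' | h'
        · exact pvCnt_le_pvM h'
        · simp at h'; exact absurd h' hyx
    · exact ⟨x, by simp, by rw [pvCnt_append]; simp; omega⟩
  refine ⟨hM, ?_⟩
  have hxcnt : pvCnt l x = pvM l - 1 := by omega
  unfold pvAtM
  rw [hM, ← List.countP_eq_length_filter, ← List.countP_eq_length_filter]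
  by_cases hxl : x ∈ l
  · rw [pvDedup_append, if_pos hxl]
    apply pvCountPFlip (x := x) (pvNodup_dedup l) ((PySem.List.mem_dedup _ _).mpr hxl)
    · simp only [decide_eq_false_iff_not]
      omega
    · simp only [decide_eq_true_eq]
      rw [pvCnt_append]; simp; omega
    · intro y hy hyx
      rw [pvCnt_append]
      simp [hyx]
  · rw [pvDedup_append, if_neg hxl, List.countP_append]
    have h1 : (PySem.List.dedup l).countP (fun y => decide (pvCnt (l ++ [x]) y = pvM l))
        = (PySem.List.dedup l).countP (fun y => decide (pvCnt l y = pvM l)) := by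
      apply List.countP_congr
      intro y hy
      have hyl : y ∈ l := (PySem.List.mem_dedup _ _).mp hy
      have hyx : y ≠ x := fun hc => hxl (hc ▸ hyl)
      rw [pvCnt_append]; simp [hyx]
    have h2 : ([x] : List Int).countP (fun y => decide (pvCnt (l ++ [x]) y = pvM l)) = 1 := by
      simp only [List.countP_cons, List.countP_nil]
      rw [pvCnt_append]; simp; omega
    omega

theorem pvAppend_lt {l : List Int} {x : Int} (h : pvCnt l x + 1 < pvM l) :
    pvM (l ++ [x]) = pvM l ∧ pvAtM (l ++ [x]) = pvAtM l := by
  have hc0 := pvCnt_nonneg l x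
  have hln : l ≠ [] := pvM_ne_nil (by omega)
  have hM : pvM (l ++ [x]) = pvM l := by
    apply pvM_unique
    · intro y hy
      rw [pvCnt_append]
      by_cases hyx : y = x
      · subst hyx; simp; omega
      · simp only [hyx, if_false, add_zero]
        rcases List.mem_append.mp hy with h' | h'
        · exact pvCnt_le_pvM h'
        · simp at h'; exact absurd h' hyx
    · obtain ⟨y, hy, hval⟩ := pvM_att hln
      have hyx : y ≠ x := by
        intro hc; subst hc; omega
      exact ⟨y, by simp [hy], by rw [pvCnt_append]; simp [hyx]; omega⟩
  refine ⟨hM, ?_⟩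
  unfold pvAtM
  rw [hM]
  have hcong : ∀ y ∈ PySem.List.dedup l,
      (decide (pvCnt (l ++ [x]) y = pvM l) : Bool) = decide (pvCnt l y = pvM l) := by
    intro y hy
    by_cases hyx : y = x
    · subst hyx
      rw [pvCnt_append]; simp; omega
    · rw [pvCnt_append]; simp [hyx]
  by_cases hxl : x ∈ l
  · rw [pvDedup_append, if_pos hxl]
    exact List.filter_congr hcong
  · rw [pvDedup_append, if_neg hxl, List.filter_append]
    rw [List.filter_congr hcong]
    have h1 : ([x] : List Int).filter (fun y => decide (pvCnt (l ++ [x]) y = pvM l)) = [] := by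
      simp only [List.filter_cons, List.filter_nil]
      rw [pvCnt_append]; simp; omega
    rw [h1, List.append_nil]

-- ---- A-side: the dict build is Counter, the key scan computes (pvM, pvMost) ----
theorem pvStepEq (d : PySem.Dict Int Int) (i : Int) :
    (if d.contains i then d.modify i 0 (· + 1) else d.insert i 1) = d.modify i 0 (· + 1) := by
  by_cases h : d.contains i
  · simp [h]
  · have h' : d.contains i = false := by simpa using h
    rw [if_neg h]
    apply PySem.Dict.ext
    simp [PySem.Dict.insert, PySem.Dict.modify, h', PySem.Dict.getD_of_not_contains d 0 h']

theorem pvBuild_eq (l : List Int) : pvBuild l = PySem.Dict.counter l := by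
  unfold pvBuild
  rw [PySem.Dict.counter_eq_foldl]
  congr 1
  funext d i
  exact pvStepEq d i

def pvMatch : List Int → Option Int
  | [x] => some x
  | _ => none

theorem pvMatch_len_ne (l : List Int) (h : l.length ≠ 1) : pvMatch l = none := by
  match l with
  | [] => rfl
  | [x] => simp at h
  | a :: b :: t => rfl

theorem pvScanGen (c : Int → Int) (ds : List Int) (hc : ∀ x ∈ ds, 1 ≤ c x) :
    ds.foldl (fun st x =>
        if c x > st.1 then (c x, some x)
        else if c x = st.1 then (c x, none)
        else st) ((0:Int), (none : Option Int))
      = (ds.foldl (fun b x => max b (c x)) 0,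
         pvMatch (ds.filter (fun x => c x = ds.foldl (fun b x => max b (c x)) 0)))
    ∧ (ds ≠ [] → ∃ y ∈ ds, c y = ds.foldl (fun b x => max b (c x)) 0) := by
  induction ds using List.reverseRecOn with
  | nil => exact ⟨rfl, fun h => absurd rfl h⟩
  | append_singleton t x ih =>
    have hct : ∀ y ∈ t, 1 ≤ c y := fun y hy => hc y (List.mem_append_left _ hy)
    obtain ⟨ihval, ihatt⟩ := ih hct
    have hmax : (t ++ [x]).foldl (fun b x => max b (c x)) 0
        = max (t.foldl (fun b x => max b (c x)) 0) (c x) := by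
      rw [List.foldl_append]; rfl
    set B := t.foldl (fun b x => max b (c x)) 0 with hB
    have hbnd : ∀ y ∈ t, c y ≤ B := by
      intro y hy
      have := (PySem.List.le_foldl_max (t.map c) 0)
      rw [List.foldl_map] at this
      exact this.2 _ (List.mem_map_of_mem hy)
    rw [List.foldl_append, List.foldl_cons, List.foldl_nil, ihval, hmax]
    rcases lt_trichotomy B (c x) with hgt | heq | hlt
    · -- c x > B : new unique maximum at x
      have hmx : max B (c x) = c x := max_eq_right hgt.le
      have hfilt : (t ++ [x]).filter (fun y => decide (c y = c x)) = [x] := by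
        rw [List.filter_append]
        have h1 : t.filter (fun y => decide (c y = c x)) = [] := by
          rw [List.filter_eq_nil_iff]
          intro y hy
          simp only [decide_eq_true_eq]
          have := hbnd y hy
          omega
        simp [h1]
      constructor
      · rw [if_pos hgt, hmx, hfilt]
        rfl
      · exact fun _ => ⟨x, by simp, by rw [hmx]⟩
    · -- c x = B : tie
      have htn : t ≠ [] := by
        intro hc'; subst hc'
        have := hc x (by simp)
        simp [hB] at heq
        omega
      obtain ⟨y, hy, hyval⟩ := ihatt htn
      have hmx : max B (c x) = B := by omega
      have hyf : y ∈ t.filter (fun z => decide (c z = B)) := by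
        rw [List.mem_filter]
        exact ⟨hy, by simp [hyval]⟩
      have hfl : 2 ≤ ((t ++ [x]).filter (fun z => decide (c z = B))).length := by
        rw [List.filter_append]
        have hx1 : ([x].filter (fun z => decide (c z = B))).length = 1 := by
          simp [show c x = B from heq.symm]
        have h1 : 1 ≤ (t.filter (fun z => decide (c z = B))).length := List.length_pos_of_mem hyf
        rw [List.length_append]
        omega
      constructor
      · rw [if_neg (by omega), if_pos heq.symm, hmx, ← heq]
        rw [pvMatch_len_ne _ (by omega)]
      · exact fun _ => ⟨y, List.mem_append_left _ hy, by rw [hmx]; exact hyval⟩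
    · -- c x < B
      have hmx : max B (c x) = B := max_eq_left hlt.le
      have hfilt : (t ++ [x]).filter (fun z => decide (c z = B)) = t.filter (fun z => decide (c z = B)) := by
        rw [List.filter_append]
        have h1 : [x].filter (fun z => decide (c z = B)) = [] := by simp; omega
        simp [h1]
      constructor
      · rw [if_neg (by omega), if_neg (by omega), hmx, hfilt]
      · intro _
        have htn : t ≠ [] := by
          intro hc'; subst hc'
          simp [hB] at hlt
          have := hc x (by simp)
          omega
        obtain ⟨y, hy, hyval⟩ := ihatt htn
        exact ⟨y, List.mem_append_left _ hy, by rw [hmx]; exact hyval⟩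

theorem pvScan_spec (l : List Int) : pvScan (pvBuild l) = (pvM l, pvMost l) := by
  rw [pvBuild_eq]
  unfold pvScan
  rw [PySem.Dict.keys_counter]
  have hkeys : PySem.Set.ofList l = PySem.List.dedup l := (PySem.List.dedup_eq_ofList l).symm
  rw [hkeys]
  have hfun : (fun (st : Int × Option Int) k =>
      let c := (PySem.Dict.counter l).getD k 0
      if c > st.1 then (c, some k) else if c = st.1 then (c, none) else st)
    = (fun (st : Int × Option Int) x =>
      if pvCnt l x > st.1 then (pvCnt l x, some x)
      else if pvCnt l x = st.1 then (pvCnt l x, none) else st) := by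
    funext st k
    simp only [PySem.Dict.getD_counter]
    rfl
  rw [hfun]
  have hc : ∀ x ∈ PySem.List.dedup l, 1 ≤ pvCnt l x := by
    intro x hx
    have : x ∈ l := (PySem.List.mem_dedup _ _).mp hx
    unfold pvCnt
    exact_mod_cast List.one_le_count_iff.mpr this
  have := (pvScanGen (pvCnt l) (PySem.List.dedup l) hc).1
  rw [this]
  rfl

theorem pvEqMost_dec (a b : Option Int) : pvEqMost a b = (pvDec a == pvDec b) := by
  match a, b with
  | some v, some w => rfl
  | some v, none => rfl
  | none, some w => rfl
  | none, none => simp [pvEqMost, pvDec]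

-- A's outer loop invariant, then A's result as a countP over the split positions
theorem pvLoopA (A : List Int) :
    ∀ m : Nat, m + 1 ≤ A.length →
    (List.range m).foldl (fun st (_ : Nat) => pvStepA st)
      (([] : List Int), A, (0 : Int))
    = (A.take m, A.drop m, ((List.range m).countP (pvEqAt A) : Int)) := by
  intro m
  induction m with
  | zero => intro _; simp
  | succ m ih =>
    intro hm
    rw [List.range_succ, List.foldl_append, ih (by omega), List.foldl_cons, List.foldl_nil]
    have hmlt : m < A.length := by omega
    have hget : PySem.List.pyGet? (A.drop m) 0 = some (A.get ⟨m, hmlt⟩) := by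
      have hne : A.drop m ≠ [] := by
        intro hc
        have := List.drop_eq_nil_iff.mp hc
        omega
      obtain ⟨h, t, hht⟩ := List.exists_cons_of_ne_nil hne
      rw [hht]
      simp [PySem.List.pyGet?, PySem.List.pyIdx?]
      have : A.drop m = A.get ⟨m, hmlt⟩ :: A.drop (m+1) := by
        rw [List.drop_eq_getElem_cons hmlt]; rfl
      rw [this] at hht
      exact (List.cons.injEq _ _ _ _ ▸ hht) |>.1.symm
    unfold pvStepA
    simp only [hget]
    have htake : A.take m ++ [A.get ⟨m, hmlt⟩] = A.take (m+1) := by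
      rw [List.take_add_one]
      simp [List.getElem?_eq_getElem hmlt]
    have hdrop : (A.drop m).drop 1 = A.drop (m+1) := by
      rw [List.drop_drop]
    simp only [htake, hdrop, pvScan_spec]
    have heq : pvEqMost (pvMost (A.take (m+1))) (pvMost (A.drop (m+1))) = pvEqAt A m := by
      rw [pvEqMost_dec]; rfl
    rw [heq]
    by_cases hE : pvEqAt A m <;>
      simp [hE, List.countP_append]

theorem pvSolutionA (A : List Int) :
    solution A = (((List.range (A.length - 1)).countP (pvEqAt A) : Nat) : Int) := by
  unfold solution
  rw [PySem.List.pyRange_one]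
  have h1 : (((A.length : Int) - 1) - 0).toNat = A.length - 1 := by omega
  rw [h1, List.foldl_map]
  by_cases h0 : A.length = 0
  · obtain rfl : A = [] := List.length_eq_zero_iff.mp h0
    rfl
  · have h := pvLoopA A (A.length - 1) (by omega)
    calc (List.foldl (fun st (_ : Nat) => pvStepA st) (([] : List Int), A, (0:Int)) (List.range (A.length - 1))).2.2
        = _ := by rw [h]

-- ---- B-side: the incremental pass computes pvMost of every prefix ----
theorem pvLoopB (seq : List Int) :
    (seq.foldl pvStepB (PySem.Dict.empty, (0:Int), (0:Int), (0:Int), ([] : List Int))).1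
        = PySem.Dict.counter seq
    ∧ (seq.foldl pvStepB (PySem.Dict.empty, (0:Int), (0:Int), (0:Int), ([] : List Int))).2.1
        = pvM seq
    ∧ (seq.foldl pvStepB (PySem.Dict.empty, (0:Int), (0:Int), (0:Int), ([] : List Int))).2.2.1
        = ((pvAtM seq).length : Int)
    ∧ ((pvAtM seq).length = 1 →
        pvAtM seq = [(seq.foldl pvStepB (PySem.Dict.empty, (0:Int), (0:Int), (0:Int), ([] : List Int))).2.2.2.1])
    ∧ (seq.foldl pvStepB (PySem.Dict.empty, (0:Int), (0:Int), (0:Int), ([] : List Int))).2.2.2.2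
        = (List.range seq.length).map (fun k => pvDec (pvMost (seq.take (k+1)))) := by
  induction seq using List.reverseRecOn with
  | nil => exact ⟨rfl, rfl, rfl, fun h => by simp [pvAtM] at h, rfl⟩
  | append_singleton t x ih =>
    obtain ⟨ihc, ihm, ihl, ihmod, ihout⟩ := ih
    rw [List.foldl_append, List.foldl_cons, List.foldl_nil]
    set st := t.foldl pvStepB (PySem.Dict.empty, (0:Int), (0:Int), (0:Int), ([] : List Int)) with hst
    have hc : st.1.getD x 0 + 1 = pvCnt t x + 1 := by
      rw [ihc, PySem.Dict.getD_counter]; rfl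
    have hcounts : st.1.insert x (st.1.getD x 0 + 1) = PySem.Dict.counter (t ++ [x]) := by
      rw [ihc]
      conv_rhs => rw [← PySem.Dict.foldl_insert_getD_add_one_eq_counter, List.foldl_append,
        List.foldl_cons, List.foldl_nil, PySem.Dict.foldl_insert_getD_add_one_eq_counter]
    have houtpref : (List.range t.length).map (fun k => pvDec (pvMost ((t ++ [x]).take (k+1))))
        = (List.range t.length).map (fun k => pvDec (pvMost (t.take (k+1)))) := by
      apply List.map_congr_left
      intro k hk
      rw [List.take_append_of_le_length (by simp at hk; omega)]
    have htakeall : (t ++ [x]).take (t.length + 1) = t ++ [x] := by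
      apply List.take_of_length_le; simp
    have hrange : (List.range (t ++ [x]).length).map (fun k => pvDec (pvMost ((t ++ [x]).take (k+1))))
        = (List.range t.length).map (fun k => pvDec (pvMost (t.take (k+1))))
          ++ [pvDec (pvMost (t ++ [x]))] := by
      rw [List.length_append, List.length_singleton, List.range_succ, List.map_append,
        houtpref, List.map_singleton, htakeall]
    rcases lt_trichotomy (pvM t) (pvCnt t x + 1) with hgt | heq | hlt
    · obtain ⟨hM, hA⟩ := pvAppend_gt hgt
      have hif : pvStepB st x
          = (st.1.insert x (st.1.getD x 0 + 1), pvCnt t x + 1, 1, x, st.2.2.2.2 ++ [x]) := by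
        simp only [pvStepB]
        rw [hc, ihm, if_pos hgt]
        simp
      rw [hif]
      refine ⟨hcounts, by rw [hM], by rw [hA]; rfl, fun _ => by rw [hA], ?_⟩
      rw [ihout, hrange, pvMost_of_singleton hA]
      rfl
    · obtain ⟨hM, hL⟩ := pvAppend_eq heq.symm
      have hlpos : 1 ≤ (pvAtM t).length := by
        have h1 : 0 ≤ pvCnt t x := pvCnt_nonneg t x
        have htn : t ≠ [] := pvM_ne_nil (by omega)
        have := pvAtM_ne htn
        cases hA : pvAtM t with
        | nil => exact absurd hA this
        | cons a l => simp
      have hif : pvStepB st x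
          = (st.1.insert x (st.1.getD x 0 + 1), pvM t, ((pvAtM t).length : Int) + 1, st.2.2.2.1,
             st.2.2.2.2 ++ [if ((pvAtM t).length : Int) + 1 = 1 then st.2.2.2.1 else 0]) := by
        simp only [pvStepB]
        rw [hc, ihm, if_neg (by omega), if_pos heq.symm, ihl]
      rw [hif]
      have hne1 : ((pvAtM t).length : Int) + 1 ≠ 1 := by omega
      refine ⟨hcounts, by rw [hM], by rw [hL]; push_cast [Nat.cast_add]; ring, ?_, ?_⟩
      · intro h1; rw [hL] at h1; omega
      · rw [ihout, hrange, if_neg hne1, pvMost_of_len_ne (by rw [hL]; omega)]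
        rfl
    · obtain ⟨hM, hA⟩ := pvAppend_lt hlt
      have hif : pvStepB st x
          = (st.1.insert x (st.1.getD x 0 + 1), pvM t, ((pvAtM t).length : Int), st.2.2.2.1,
             st.2.2.2.2 ++ [if ((pvAtM t).length : Int) = 1 then st.2.2.2.1 else 0]) := by
        simp only [pvStepB]
        rw [hc, ihm, if_neg (by omega), if_neg (by omega), ihl]
      rw [hif]
      refine ⟨hcounts, by rw [hM], by rw [hA], fun h1 => by rw [hA]; exact ihmod (by rwa [hA] at h1), ?_⟩
      rw [ihout, hrange]
      by_cases h1 : (pvAtM t).length = 1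
      · rw [if_pos (by exact_mod_cast h1)]
        have := ihmod h1
        rw [pvMost_of_singleton (hA.trans this)]
        rfl
      · rw [if_neg (by exact_mod_cast h1), pvMost_of_len_ne (by rwa [hA])]
        rfl

theorem pvModes_eq (seq : List Int) :
    pvModes seq = (List.range seq.length).map (fun k => pvDec (pvMost (seq.take (k+1)))) := by
  exact (pvLoopB seq).2.2.2.2

-- ---- pvMost only depends on the multiset: reversing the list keeps it ----
theorem pvCnt_reverse (l : List Int) : pvCnt l.reverse = pvCnt l := by
  funext y; unfold pvCnt; rw [List.count_reverse]

theorem pvDedup_reverse_perm (l : List Int) : (PySem.List.dedup l.reverse).Perm (PySem.List.dedup l) := by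
  apply (List.perm_ext_iff_of_nodup (pvNodup_dedup _) (pvNodup_dedup _)).mpr
  intro a
  rw [PySem.List.mem_dedup, PySem.List.mem_dedup, List.mem_reverse]

theorem pvM_reverse (l : List Int) : pvM l.reverse = pvM l := by
  unfold pvM
  rw [pvCnt_reverse]
  have : RightCommutative (fun (b : Int) (x : Int) => max b (pvCnt l x)) :=
    ⟨fun b x y => by simp [max_comm, max_left_comm]⟩
  exact (pvDedup_reverse_perm l).foldl_eq 0

theorem pvAtM_reverse_perm (l : List Int) : (pvAtM l.reverse).Perm (pvAtM l) := by
  unfold pvAtM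
  rw [pvCnt_reverse, pvM_reverse]
  exact (pvDedup_reverse_perm l).filter _

theorem pvMost_reverse (l : List Int) : pvMost l.reverse = pvMost l := by
  have hp := pvAtM_reverse_perm l
  cases hA : pvAtM l with
  | nil =>
    rw [hA] at hp
    have := List.Perm.eq_nil hp
    unfold pvMost
    rw [this, hA]
  | cons a s =>
    cases s with
    | nil =>
      rw [hA] at hp
      have := List.Perm.eq_singleton hp
      unfold pvMost
      rw [this, hA]
    | cons b u =>
      have h1 : (pvAtM l.reverse).length ≠ 1 := by
        rw [hp.length_eq, hA]; simp
      have h2 : (pvAtM l).length ≠ 1 := by rw [hA]; simp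
      rw [pvMost_of_len_ne h1, pvMost_of_len_ne h2]

theorem pvSolutionB (A : List Int) :
    solution_alt A = (((List.range (A.length - 1)).countP (pvEqAt A) : Nat) : Int) := by
  unfold solution_alt
  by_cases h2 : (A.length : Int) < 2
  · rw [if_pos h2]
    have : A.length - 1 = 0 := by omega
    rw [this]
    rfl
  · rw [if_neg h2]
    have hlen : 2 ≤ A.length := by omega
    rw [PySem.List.pyRange_one]
    have h1 : (((A.length : Int) - 1) - 0).toNat = A.length - 1 := by omega
    rw [h1, List.foldl_map, PySem.List.foldl_add]
    have hmap : ∀ k ∈ List.range (A.length - 1),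
        (fun y : Nat => if (PySem.List.pyGet? (pvModes A) (0 + (y:Int)) == PySem.List.pyGet? (pvModes A.reverse) ((A.length : Int) - 2 - (0 + (y:Int)))) = true then (1:Int) else 0) k
        = (fun k => if pvEqAt A k then (1:Int) else 0) k := by
      intro k hk
      rw [List.mem_range] at hk
      simp only [zero_add]
      have hkA : ((A.length : Int) - 2 - k) = ((A.length - 2 - k : Nat) : Int) := by
        omega
      rw [hkA, PySem.List.pyGet?_natCast, PySem.List.pyGet?_natCast, pvModes_eq, pvModes_eq,
        List.length_reverse]
      rw [List.getElem?_map, List.getElem?_map]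
      rw [List.getElem?_range (show k < A.length from by omega)]
      rw [List.getElem?_range (show A.length - 2 - k < A.length from by omega)]
      simp only [Option.map_some]
      have hsuf : A.reverse.take (A.length - 2 - k + 1) = (A.drop (k+1)).reverse := by
        have hidx : A.length - (A.length - 2 - k + 1) = k + 1 := by omega
        rw [List.take_reverse, hidx]
      simp only [hsuf, pvMost_reverse]
      unfold pvEqAt
      by_cases hE : pvDec (pvMost (A.take (k+1))) = pvDec (pvMost (A.drop (k+1)))
      · simp [hE]
      · simp [hE]
    rw [List.map_congr_left hmap, PySem.List.sum_map_ite_one_zero, zero_add]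

-- ===== VERDICT (by name: the statement is the Claim_ definition above) =====
theorem solution_spec : Claim_equal_solution := by
  intro A _
  unfold Spec_solution
  rw [pvSolutionA, pvSolutionB]
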